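-- pv_equiv track=rewrite | github.com/ptarau/PyPL | sol1.py | ksubset
-- ===== SOURCE A (Python) =====
-- def ksubset(k, xs):
--     if k == 0:
--         yield []
--     elif xs == []:
--         return []
--     else:
--         x = xs[0]
--         ys = xs[1:]
--         for zs in ksubset(k - 1, ys):
--             yield [x] + zs
--         for us in ksubset(k, ys):
--             yield us
-- ===== SOURCE B (Python) =====
-- def ksubset(k, xs):
--     # choose the position of the first chosen element, then recurse on the tail
--     if k == 0:
--         yield []
--     elif k < 0 or k > len(xs):
--         return
--     else:
--         for i in range(len(xs) - k + 1):
--             x = xs[i]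
--             tail = xs[i + 1:]
--             for t in ksubset(k - 1, tail):
--                 yield [x] + t
-- ===== Notes on version B (the rewrite author's own statement) =====
-- stated objective: alternative
-- what changed: Replaced A's binary include/exclude recursion on the head element with a single loop that picks the position of the first chosen element and recurses on the suffix after it, with explicit k<0 / k>len(xs) bounds checks.
import Mathlib
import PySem

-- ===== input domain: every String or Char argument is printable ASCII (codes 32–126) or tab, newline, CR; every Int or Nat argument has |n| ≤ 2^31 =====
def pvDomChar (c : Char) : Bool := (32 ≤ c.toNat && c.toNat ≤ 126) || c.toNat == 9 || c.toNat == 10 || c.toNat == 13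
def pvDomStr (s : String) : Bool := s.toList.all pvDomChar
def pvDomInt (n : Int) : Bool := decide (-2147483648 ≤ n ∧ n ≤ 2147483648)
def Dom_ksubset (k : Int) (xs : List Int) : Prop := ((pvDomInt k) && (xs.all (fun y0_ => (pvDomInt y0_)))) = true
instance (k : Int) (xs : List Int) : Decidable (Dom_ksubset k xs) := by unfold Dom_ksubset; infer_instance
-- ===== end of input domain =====

-- B picks the position of the first chosen element in one loop instead of A's binary
-- include/exclude head recursion; same values and order (objective: alternative).
-- Both Pythons are generators; the equivalence is about list(ksubset(k, xs)).

-- ===== PORT A =====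
-- A: if k==0 yield []; elif xs==[]: return; else yield [x]+zs over ksubset(k-1, ys), then ksubset(k, ys).
def ksubset (k : Int) (xs : List Int) : List (List Int) :=
  if k = 0 then [[]]
  else
    match xs with
    | [] => []
    | x :: ys =>
        ((ksubset (k - 1) ys).map (fun zs => x :: zs)) ++ ksubset k ys
termination_by xs.length
decreasing_by all_goals simp

-- ===== PORT B =====
-- B: if k==0 yield []; elif k<0 or k>len(xs): return; else
--    for i in range(len(xs)-k+1): for t in ksubset(k-1, xs[i+1:]): yield [xs[i]]+t.
def ksubset_alt (k : Int) (xs : List Int) : List (List Int) :=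
  if hk0 : k = 0 then [[]]
  else if hkr : k < 0 ∨ (xs.length : Int) < k then []
  else
    (PySem.List.pyRange 0 ((xs.length : Int) - k + 1) 1).attach.flatMap
      (fun p =>
        (ksubset_alt (k - 1) (PySem.List.slice xs (some (p.1 + 1)) none)).map
          (fun t => PySem.List.pyGetD xs p.1 0 :: t))
termination_by xs.length
decreasing_by
  have hi : (0:Int) ≤ p.1 ∧ p.1 < (xs.length : Int) - k + 1 :=
    PySem.List.mem_pyRange_one.mp p.2
  rw [PySem.List.slice_from xs (by omega : (0:Int) ≤ p.1 + 1)]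
  have h1 : 1 ≤ (p.1 + 1).toNat := by omega
  have h2 : 1 ≤ xs.length := by omega
  simp only [List.length_drop]; omega

-- ===== PRECONDITION & SPEC =====
def Spec_ksubset (k : Int) (xs : List Int) (out : List (List Int)) : Prop := out = ksubset_alt k xs
instance (k : Int) (xs : List Int) (out : List (List Int)) : Decidable (Spec_ksubset k xs out) := by unfold Spec_ksubset; infer_instance

-- ===== CLAIM (what is proved, stated in full; the proofs are below) =====
def Claim_equal_ksubset : Prop := ∀ (k : Int) (xs : List Int), Dom_ksubset k xs → Spec_ksubset k xs (ksubset k xs)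

-- ===== LEMMAS AND PROOFS =====

theorem flatMap_attach {α β : Type} (l : List α) (f : α → List β) :
    l.attach.flatMap (fun p => f p.1) = l.flatMap f := by
  induction l with
  | nil => rfl
  | cons x xs ih =>
      simp only [List.attach_cons, List.flatMap_cons, List.flatMap_map]
      rw [ih]

-- unfold B in the main branch, dropping the attach
theorem ksubset_alt_eq (k : Int) (xs : List Int) (hk0 : k ≠ 0)
    (hkr : ¬ (k < 0 ∨ (xs.length : Int) < k)) :
    ksubset_alt k xs =
      (PySem.List.pyRange 0 ((xs.length : Int) - k + 1) 1).flatMap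
        (fun i =>
          (ksubset_alt (k - 1) (PySem.List.slice xs (some (i + 1)) none)).map
            (fun t => PySem.List.pyGetD xs i 0 :: t)) := by
  rw [ksubset_alt.eq_def, dif_neg hk0, dif_neg hkr]
  exact flatMap_attach (PySem.List.pyRange 0 ((xs.length : Int) - k + 1) 1)
    (fun i =>
      (ksubset_alt (k - 1) (PySem.List.slice xs (some (i + 1)) none)).map
        (fun t => PySem.List.pyGetD xs i 0 :: t))

theorem ksubset_alt_zero (xs : List Int) : ksubset_alt 0 xs = [[]] := by
  rw [ksubset_alt.eq_def]; simp

theorem ksubset_alt_out (k : Int) (xs : List Int) (hk0 : k ≠ 0)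
    (hkr : k < 0 ∨ (xs.length : Int) < k) : ksubset_alt k xs = [] := by
  rw [ksubset_alt.eq_def, dif_neg hk0, dif_pos hkr]

-- B satisfies A's recurrence on a cons cell
theorem ksubset_alt_rec (k : Int) (x : Int) (ys : List Int) (hk0 : k ≠ 0) :
    ksubset_alt k (x :: ys) =
      ((ksubset_alt (k - 1) ys).map (fun zs => x :: zs)) ++ ksubset_alt k ys := by
  by_cases hneg : k < 0
  · rw [ksubset_alt_out k (x :: ys) hk0 (Or.inl hneg),
        ksubset_alt_out (k - 1) ys (by omega) (Or.inl (by omega)),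
        ksubset_alt_out k ys hk0 (Or.inl hneg)]
    rfl
  · by_cases hbig : ((x :: ys).length : Int) < k
    · have hL : (ys.length : Int) + 1 < k := by
        simp only [List.length_cons] at hbig; push_cast at hbig; omega
      rw [ksubset_alt_out k (x :: ys) hk0 (Or.inr hbig),
          ksubset_alt_out (k - 1) ys (by omega) (Or.inr (by omega)),
          ksubset_alt_out k ys hk0 (Or.inr (by omega))]
      rfl
    · -- main case: 1 ≤ k ≤ ys.length + 1
      have hk1 : 1 ≤ k := by omega
      have hkle : k ≤ (ys.length : Int) + 1 := by
        simp only [List.length_cons] at hbig; push_cast at hbig; omega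
      rw [ksubset_alt_eq k (x :: ys) hk0 (not_or.mpr ⟨hneg, hbig⟩)]
      have hlen : ((x :: ys).length : Int) - k + 1 = ((ys.length : Int) - k + 1) + 1 := by
        simp only [List.length_cons]; push_cast; omega
      rw [hlen, PySem.List.pyRange_one_cons (by omega : (0:Int) < (ys.length : Int) - k + 1 + 1)]
      rw [List.flatMap_cons]
      congr 1
      · -- the i = 0 term
        have h0 : PySem.List.slice (x :: ys) (some ((0:Int) + 1)) none = ys := by
          rw [PySem.List.slice_from (x :: ys) (by omega : (0:Int) ≤ 0 + 1)]; rfl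
        rw [h0, PySem.List.pyGetD_zero_cons]
      · -- the i ≥ 1 terms equal ksubset_alt k ys
        by_cases hedge : k = (ys.length : Int) + 1
        · rw [PySem.List.pyRange_one_eq_nil (by omega),
              ksubset_alt_out k ys hk0 (Or.inr (by omega))]
          rfl
        · rw [ksubset_alt_eq k ys hk0 (by omega)]
          rw [PySem.List.pyRange_one (0+1) ((ys.length : Int) - k + 1 + 1),
              PySem.List.pyRange_one 0 ((ys.length : Int) - k + 1)]
          rw [List.flatMap_map, List.flatMap_map]
          have hn : ((ys.length : Int) - k + 1 + 1 - (0 + 1)).toNat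
                  = ((ys.length : Int) - k + 1 - 0).toNat := by omega
          rw [hn]
          apply List.flatMap_congr
          intro j _
          have hs1 : PySem.List.slice (x :: ys) (some (0 + 1 + (j : Int) + 1)) none
                   = ys.drop (j + 1) := by
            rw [PySem.List.slice_from (x :: ys) (by omega : (0:Int) ≤ 0 + 1 + (j : Int) + 1)]
            have ht : (0 + 1 + (j : Int) + 1).toNat = j + 2 := by omega
            rw [ht]; rfl
          have hs2 : PySem.List.slice ys (some (0 + (j : Int) + 1)) none = ys.drop (j + 1) := by
            rw [PySem.List.slice_from ys (by omega : (0:Int) ≤ 0 + (j : Int) + 1)]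
            have ht : (0 + (j : Int) + 1).toNat = j + 1 := by omega
            rw [ht]
          have hg1 : PySem.List.pyGetD (x :: ys) (0 + 1 + (j : Int)) 0 = ys.getD j 0 := by
            have ht : (0 + 1 + (j : Int)) = ((j + 1 : Nat) : Int) := by push_cast; ring
            rw [ht, PySem.List.pyGetD_natCast, List.getD_cons_succ]
          have hg2 : PySem.List.pyGetD ys (0 + (j : Int)) 0 = ys.getD j 0 := by
            have ht : (0 + (j : Int)) = ((j : Nat) : Int) := by ring
            rw [ht, PySem.List.pyGetD_natCast]
          rw [hs1, hs2, hg1, hg2]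

theorem ksubset_eq_alt (xs : List Int) : ∀ k : Int, ksubset k xs = ksubset_alt k xs := by
  induction xs with
  | nil =>
      intro k
      by_cases hk : k = 0
      · subst hk; rw [ksubset_alt_zero, ksubset.eq_def]; rfl
      · rw [ksubset.eq_def, if_neg hk, ksubset_alt_out k [] hk (by simp; omega)]
  | cons x ys ih =>
      intro k
      by_cases hk : k = 0
      · subst hk; rw [ksubset_alt_zero, ksubset.eq_def]; rfl
      · have hA : ksubset k (x :: ys)
            = ((ksubset (k - 1) ys).map (fun zs => x :: zs)) ++ ksubset k ys := by
          rw [ksubset.eq_def, if_neg hk]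
        rw [hA, ksubset_alt_rec k x ys hk, ih (k - 1), ih k]

-- ===== VERDICT (by name: the statement is the Claim_ definition above) =====
theorem ksubset_spec : Claim_equal_ksubset := by
  intro k xs _
  unfold Spec_ksubset
  exact ksubset_eq_alt xs k
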